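-- pv_equiv track=rewrite | github.com/aglahir1/Advent-of-Code | Advent of Code/2020/14.py | maskedv2
-- ===== SOURCE A (Python) =====
-- from typing import Dict, List
--
-- def maskedv2(mask: str, num: int) -> List:
--     bitstring: str = str(bin(num))[2:]
--     bitstring = '0' * (36 - len(bitstring)) + bitstring
--     resultArray = ['']
--     for b, m in zip(bitstring, mask):
--         if m == 'X':
--             branched = []
--             for prior in resultArray:
--                 branched.append(prior + '0')
--                 branched.append(prior + '1')
--             resultArray = branched
--         elif m == '0':
--             for i, prior in enumerate(resultArray):
--                 resultArray[i] += b
--         else: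
--             for i, prior in enumerate(resultArray):
--                 resultArray[i] += '1'
--     return resultArray
-- ===== SOURCE B (Python) =====
-- from typing import List
--
-- def _combos(k: int) -> List[str]:
--     if k == 0:
--         return ['']
--     return [b + rest for b in '01' for rest in _combos(k - 1)]
--
-- def maskedv2(mask: str, num: int) -> List:
--     bitstring: str = str(bin(num))[2:]
--     bitstring = '0' * (36 - len(bitstring)) + bitstring
--     template = []
--     nx = 0
--     for b, m in zip(bitstring, mask):
--         if m == 'X':
--             template.append(None)
--             nx += 1
--         elif m == '0':
--             template.append(b)
--         else:
--             template.append('1')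
--     out = []
--     for combo in _combos(nx):
--         it = iter(combo)
--         out.append(''.join(next(it) if c is None else c for c in template))
--     return out
-- ===== Notes on version B (the rewrite author's own statement) =====
-- stated objective: alternative
-- what changed: Instead of evolving a growing resultArray that branches in place at every X, B makes one pass to build a fixed template (literal char per position, None at each X) plus the X count, then enumerates the 2^k bit combinations recursively and fills each into the template.
import Mathlib
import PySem

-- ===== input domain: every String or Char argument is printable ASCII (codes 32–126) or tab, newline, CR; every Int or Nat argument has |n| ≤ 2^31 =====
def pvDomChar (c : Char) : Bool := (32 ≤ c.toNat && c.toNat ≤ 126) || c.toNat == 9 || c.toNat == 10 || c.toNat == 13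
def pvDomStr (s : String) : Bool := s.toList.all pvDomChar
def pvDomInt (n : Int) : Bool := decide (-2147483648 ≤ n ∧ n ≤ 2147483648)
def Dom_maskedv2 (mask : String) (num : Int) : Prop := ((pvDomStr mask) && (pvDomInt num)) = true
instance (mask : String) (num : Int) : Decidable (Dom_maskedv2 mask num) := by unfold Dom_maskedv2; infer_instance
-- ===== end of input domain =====

-- B builds a fixed template (char per position, none at each X) in one pass, then
-- enumerates the 2^k bit combinations recursively and fills each into the template,
-- instead of A's in-place branching resultArray.

-- shared input preparation (both Pythons compute the identical two lines):
-- binNat n = binary digits of n (MSB first), empty for 0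
def binNat : Nat → List Char
  | 0 => []
  | n + 1 => binNat ((n + 1) / 2) ++ [if (n + 1) % 2 = 1 then '1' else '0']

-- exact port of: bitstring = str(bin(num))[2:]; bitstring = '0'*(36-len(bitstring)) + bitstring
-- (Python bin: '0b…' for n ≥ 0 with bin(0)='0b0', '-0b…' for n < 0, so [2:] keeps the 'b' then;
--  '0'*(negative) = '' matches Nat subtraction clamping)
def pyBitstring (num : Int) : List Char :=
  let s : List Char :=
    if num < 0 then 'b' :: binNat num.natAbs
    else if num = 0 then ['0']
    else binNat num.natAbs
  List.replicate (36 - s.length) '0' ++ s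

-- ===== PORT A =====
def maskedv2 (mask : String) (num : Int) : List String :=
  let bitstring := pyBitstring num
  let res :=
    (List.zip bitstring mask.toList).foldl
      (fun (res : List (List Char)) bm =>
        if bm.2 = 'X' then
          res.flatMap (fun prior => [prior ++ ['0'], prior ++ ['1']])
        else if bm.2 = '0' then
          res.map (fun prior => prior ++ [bm.1])
        else
          res.map (fun prior => prior ++ ['1']))
      [[]]
  res.map String.ofList

-- ===== PORT B =====
-- _combos(k): all length-k strings over '01', leftmost varying slowest
def combosB : Nat → List (List Char)
  | 0 => [[]]
  | k + 1 => ['0', '1'].flatMap (fun b => (combosB k).map (fun rest => b :: rest))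

-- ''.join(next(it) if c is None else c for c in template)
def fillT : List (Option Char) → List Char → List Char
  | [], _ => []
  | some c :: t, cs => c :: fillT t cs
  | none :: t, [] => fillT t []
  | none :: t, c :: cs => c :: fillT t cs

def maskedv2_alt (mask : String) (num : Int) : List String :=
  let bitstring := pyBitstring num
  let tn :=
    (List.zip bitstring mask.toList).foldl
      (fun (acc : List (Option Char) × Nat) bm =>
        if bm.2 = 'X' then (acc.1 ++ [none], acc.2 + 1)
        else if bm.2 = '0' then (acc.1 ++ [some bm.1], acc.2)
        else (acc.1 ++ [some '1'], acc.2))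
      ([], 0)
  (combosB tn.2).map (fun combo => String.ofList (fillT tn.1 combo))

-- ===== PRECONDITION & SPEC =====
def Spec_maskedv2 (mask : String) (num : Int) (out : List String) : Prop := out = maskedv2_alt mask num
instance (mask : String) (num : Int) (out : List String) : Decidable (Spec_maskedv2 mask num out) := by unfold Spec_maskedv2; infer_instance

-- ===== CLAIM (what is proved, stated in full; the proofs are below) =====
def Claim_equal_maskedv2 : Prop := ∀ (mask : String) (num : Int), Dom_maskedv2 mask num → Spec_maskedv2 mask num (maskedv2 mask num)

-- ===== LEMMAS AND PROOFS =====

-- the per-position template character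
def tchar (bm : Char × Char) : Option Char :=
  if bm.2 = 'X' then none else if bm.2 = '0' then some bm.1 else some '1'

def countX : List (Char × Char) → Nat
  | [] => 0
  | bm :: ps => (if bm.2 = 'X' then 1 else 0) + countX ps

-- B's template-building foldl characterised
theorem buildT_eq (ps : List (Char × Char)) (acc : List (Option Char) × Nat) :
    ps.foldl
      (fun (acc : List (Option Char) × Nat) bm =>
        if bm.2 = 'X' then (acc.1 ++ [none], acc.2 + 1)
        else if bm.2 = '0' then (acc.1 ++ [some bm.1], acc.2)
        else (acc.1 ++ [some '1'], acc.2)) acc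
    = (acc.1 ++ ps.map tchar, acc.2 + countX ps) := by
  induction ps generalizing acc with
  | nil => simp [countX]
  | cons bm ps ih =>
    simp only [List.foldl_cons, List.map_cons, countX, tchar]
    by_cases hX : bm.2 = 'X'
    · simp only [if_pos hX, ih, Prod.mk.injEq]; exact ⟨by simp, by omega⟩
    · by_cases h0 : bm.2 = '0' <;> simp [if_neg hX, h0, ih]

-- A's branching foldl equals the product-and-fill enumeration
theorem afold_eq (ps : List (Char × Char)) (acc : List (List Char)) :
    ps.foldl
      (fun (res : List (List Char)) bm =>
        if bm.2 = 'X' then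
          res.flatMap (fun prior => [prior ++ ['0'], prior ++ ['1']])
        else if bm.2 = '0' then
          res.map (fun prior => prior ++ [bm.1])
        else
          res.map (fun prior => prior ++ ['1'])) acc
    = acc.flatMap (fun a => (combosB (countX ps)).map (fun c => a ++ fillT (ps.map tchar) c)) := by
  induction ps generalizing acc with
  | nil =>
    simp [countX, combosB, fillT]
  | cons bm ps ih =>
    simp only [List.foldl_cons, List.map_cons, countX, tchar]
    by_cases hX : bm.2 = 'X'
    · simp only [hX, reduceIte, ih]
      rw [Nat.add_comm 1 (countX ps)]
      simp only [combosB]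
      rw [List.flatMap_assoc]
      congr 1
      funext a
      simp [fillT, List.append_assoc, Function.comp_def]
    · by_cases h0 : bm.2 = '0'
      · simp only [if_neg hX, if_pos h0, ih, List.flatMap_map]
        congr 1
        funext a
        simp [fillT, List.append_assoc, Function.comp_def]
      · simp only [if_neg hX, if_neg h0, ih, List.flatMap_map]
        congr 1
        funext a
        simp [fillT, List.append_assoc, Function.comp_def]

-- ===== VERDICT (by name: the statement is the Claim_ definition above) =====
theorem maskedv2_spec : Claim_equal_maskedv2 := by
  intro mask num _
  simp only [Spec_maskedv2, maskedv2, maskedv2_alt]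
  rw [buildT_eq, afold_eq]
  simp [List.map_map, Function.comp]
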